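-- pv_equiv track=rewrite | github.com/soumyadsanyal/leetcode | longest_palindromic_substring.py | search
-- ===== SOURCE A (Python) =====
-- def search(s, center):
--     i=0
--     rEdge=len(s)-1
--     while True:
--         if center-i-1<0 or center+i+1>rEdge or s[center-i-1]!=s[center+i+1]:
--             return i
--         else:
--             i+=1
-- ===== SOURCE B (Python) =====
-- def search(s, center):
--     if center < 0:
--         return 0
--     left = s[:center][::-1]
--     right = s[center + 1:]
--     n = 0
--     for a, b in zip(left, right):
--         if a != b:
--             break
--         n += 1
--     return n
-- ===== Notes on version B (the rewrite author's own statement) =====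
-- stated objective: simpler
-- what changed: Replaces the two-index while-loop expansion with explicit boundary checks by slicing out the reversed left part and the right part once and counting their common prefix over zip, which truncates at the shorter side.
import Mathlib
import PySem

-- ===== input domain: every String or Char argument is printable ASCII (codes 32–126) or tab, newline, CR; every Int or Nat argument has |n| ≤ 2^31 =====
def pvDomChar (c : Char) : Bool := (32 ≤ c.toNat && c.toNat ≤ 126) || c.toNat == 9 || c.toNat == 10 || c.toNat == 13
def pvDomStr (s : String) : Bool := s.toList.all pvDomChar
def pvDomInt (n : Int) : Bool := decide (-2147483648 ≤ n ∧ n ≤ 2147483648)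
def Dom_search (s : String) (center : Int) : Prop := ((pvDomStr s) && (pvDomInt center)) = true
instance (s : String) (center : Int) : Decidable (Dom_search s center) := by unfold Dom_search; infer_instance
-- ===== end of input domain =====

-- B replaces A's diverging two-index expansion by slicing out the reversed left part and the
-- right part and counting their common prefix over zip (objective: simpler decomposition).

-- ===== PORT A =====
-- the 'while True' loop: i only grows, and the loop must stop once center - i - 1 < 0
def searchAux (cs : List Char) (center rEdge : Int) (i : Nat) : Int :=
  if center - i - 1 < 0 ∨ center + i + 1 > rEdge ∨
      PySem.List.pyGet? cs (center - i - 1) ≠ PySem.List.pyGet? cs (center + i + 1) then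
    (i : Int)
  else
    searchAux cs center rEdge (i + 1)
termination_by center.toNat - i
decreasing_by rename_i h; push Not at h; omega

def search (s : String) (center : Int) : Int :=
  searchAux s.toList center (PySem.Str.len s - 1) 0

-- ===== PORT B =====
-- the 'for a, b in zip(...)' loop with its break
def prefLen : List (Char × Char) → Int
  | [] => 0
  | (a, b) :: rest => if a ≠ b then 0 else 1 + prefLen rest

def search_alt (s : String) (center : Int) : Int :=
  if center < 0 then 0
  else
    let left := (PySem.List.slice s.toList none (some center)).reverse
    let right := PySem.List.slice s.toList (some (center + 1)) none
    prefLen (left.zip right)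

-- ===== PRECONDITION & SPEC =====
def Spec_search (s : String) (center : Int) (out : Int) : Prop := out = search_alt s center
instance (s : String) (center : Int) (out : Int) : Decidable (Spec_search s center out) := by unfold Spec_search; infer_instance

-- ===== CLAIM (what is proved, stated in full; the proofs are below) =====
def Claim_equal_search : Prop := ∀ (s : String) (center : Int), Dom_search s center → Spec_search s center (search s center)

-- ===== LEMMAS AND PROOFS =====

theorem prefLen_nil : prefLen [] = 0 := rfl

theorem prefLen_cons (a b : Char) (r : List (Char × Char)) :
    prefLen ((a, b) :: r) = if a ≠ b then 0 else 1 + prefLen r := rfl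

-- loop invariant: from radius i on, A's loop counts the common prefix of the
-- remaining parts of the reversed-left and right lists
-- loop invariant: from radius i on, A's loop counts the common prefix of the
-- remaining parts of the reversed-left and right lists
theorem searchAux_eq (cs : List Char) (center : Int) (hc : 0 ≤ center) (i : Nat) :
    searchAux cs center ((cs.length : Int) - 1) i
      = i + prefLen ((((cs.take center.toNat).reverse).drop i).zip
                     ((cs.drop (center.toNat + 1)).drop i)) := by
  generalize hk : center.toNat - i = k
  induction k generalizing i with
  | zero =>
    rw [searchAux, if_pos (Or.inl (by omega))]
    have hL : ((cs.take center.toNat).reverse).drop i = [] := by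
      apply List.drop_eq_nil_of_le
      simp only [List.length_reverse, List.length_take]
      omega
    simp [hL, prefLen_nil]
  | succ k ih =>
    rw [searchAux]
    by_cases hcond : center - i - 1 < 0 ∨ center + i + 1 > (cs.length : Int) - 1 ∨
        PySem.List.pyGet? cs (center - i - 1) ≠ PySem.List.pyGet? cs (center + i + 1)
    · rw [if_pos hcond]
      by_cases h1 : center - (i : Int) - 1 < 0
      · exact absurd h1 (by omega)
      · by_cases h2 : center + (i : Int) + 1 > (cs.length : Int) - 1
        · have hR : (cs.drop (center.toNat + 1)).drop i = [] := by
            apply List.drop_eq_nil_of_le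
            simp only [List.length_drop]
            omega
          simp [hR, prefLen_nil]
        · have h3 := (hcond.resolve_left h1).resolve_left h2
          have hiL : i < ((cs.take center.toNat).reverse).length := by
            simp only [List.length_reverse, List.length_take]
            omega
          have hiR : i < (cs.drop (center.toNat + 1)).length := by
            simp only [List.length_drop]
            omega
          have hLi : ((cs.take center.toNat).reverse)[i] = cs[center.toNat - 1 - i]'(by omega) := by
            rw [List.getElem_reverse, List.getElem_take]
            congr 1
            simp only [List.length_take]
            omega
          have hRi : (cs.drop (center.toNat + 1))[i] = cs[center.toNat + 1 + i]'(by omega) := by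
            rw [List.getElem_drop]
          have e1 : (center - (i : Int) - 1).toNat = center.toNat - 1 - i := by omega
          have e2 : (center + (i : Int) + 1).toNat = center.toNat + 1 + i := by omega
          have key : (((cs.take center.toNat).reverse)[i] = (cs.drop (center.toNat + 1))[i])
              ↔ PySem.List.pyGet? cs (center - i - 1) = PySem.List.pyGet? cs (center + i + 1) := by
            rw [PySem.List.pyGet?_eq_some_getElem cs (i := center - (i : Int) - 1) (by omega) (by omega),
                PySem.List.pyGet?_eq_some_getElem cs (i := center + (i : Int) + 1) (by omega) (by omega)]
            simp only [e1, e2, hLi, hRi, Option.some_inj]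
          have hne : ((cs.take center.toNat).reverse)[i] ≠ (cs.drop (center.toNat + 1))[i] :=
            fun heq => h3 (key.1 heq)
          rw [List.drop_eq_getElem_cons hiL, List.drop_eq_getElem_cons hiR,
              List.zip_cons_cons, prefLen_cons, if_pos hne]
          simp
    · rw [if_neg hcond]
      push Not at hcond
      obtain ⟨h1, h2, h3⟩ := hcond
      have hiL : i < ((cs.take center.toNat).reverse).length := by
        simp only [List.length_reverse, List.length_take]
        omega
      have hiR : i < (cs.drop (center.toNat + 1)).length := by
        simp only [List.length_drop]
        omega
      have hLi : ((cs.take center.toNat).reverse)[i] = cs[center.toNat - 1 - i]'(by omega) := by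
        rw [List.getElem_reverse, List.getElem_take]
        congr 1
        simp only [List.length_take]
        omega
      have hRi : (cs.drop (center.toNat + 1))[i] = cs[center.toNat + 1 + i]'(by omega) := by
        rw [List.getElem_drop]
      have e1 : (center - (i : Int) - 1).toNat = center.toNat - 1 - i := by omega
      have e2 : (center + (i : Int) + 1).toNat = center.toNat + 1 + i := by omega
      have heq : ((cs.take center.toNat).reverse)[i] = (cs.drop (center.toNat + 1))[i] := by
        rw [PySem.List.pyGet?_eq_some_getElem cs (i := center - (i : Int) - 1) (by omega) (by omega),
            PySem.List.pyGet?_eq_some_getElem cs (i := center + (i : Int) + 1) (by omega) (by omega)] at h3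
        simp only [e1, e2, Option.some_inj] at h3
        rw [hLi, hRi]
        exact h3
      rw [List.drop_eq_getElem_cons hiL, List.drop_eq_getElem_cons hiR,
          List.zip_cons_cons, prefLen_cons, if_neg (by simpa using heq)]
      rw [ih (i + 1) (by omega)]
      push_cast
      ring

-- ===== VERDICT (by name: the statement is the Claim_ definition above) =====
theorem search_spec : Claim_equal_search := by
  intro s center _
  unfold Spec_search search search_alt
  by_cases hc : center < 0
  · rw [searchAux, if_pos (Or.inl (by push_cast; omega)), if_pos hc]
    norm_num
  · push Not at hc
    rw [if_neg (by omega)]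
    have hlen : PySem.Str.len s - 1 = ((s.toList.length : Int)) - 1 := by
      simp [PySem.Str.len_eq]
    rw [hlen, searchAux_eq s.toList center hc 0]
    simp only [List.drop_zero, Nat.cast_zero, zero_add]
    rw [PySem.List.slice_to s.toList hc, PySem.List.slice_from s.toList (by omega : (0:Int) ≤ center + 1)]
    have e : (center + 1).toNat = center.toNat + 1 := by omega
    rw [e]
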